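-- pv_equiv track=rewrite | github.com/malbori/AOC_2024 | solutions/day10/solution.py | bfs
-- ===== SOURCE A (Python) =====
-- def get_value(grid, y, x):
--     """
--     Retrieves the value at a specific grid location, or returns None if out of bounds.
--     """
--     if y < 0 or x < 0:
--         return None
--     try:
--         return grid[y][x]
--     except IndexError:
--         return None
--
-- def bfs(grid, start, is_bfs1=True):
--     """
--     Performs a breadth-first search (BFS) on the grid.
--
--     - `start`: The starting position (y, x).
--     - `is_bfs1`: Flag to determine whether to use BFS1 or BFS2 logic.
--     """
--     cur = set([start]) if is_bfs1 else [start]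
--     for i in range(9):
--         nxt = set() if is_bfs1 else []
--         for y, x in cur:
--             if get_value(grid, y, x) != i:
--                 continue
--             for dy, dx in [(-1, 0), (0, 1), (1, 0), (0, -1)]:
--                 ny, nx = y + dy, x + dx
--                 if is_bfs1:
--                     nxt.add((ny, nx))
--                 else:
--                     nxt.append((ny, nx))
--         cur = nxt
--     return sum(get_value(grid, y, x) == 9 for y, x in cur)
-- ===== SOURCE B (Python) =====
-- def bfs(grid, start, is_bfs1=True):
--     """Depth-first recursion over trail height instead of level-by-level frontier expansion."""
--     def val(y, x):
--         if y < 0 or x < 0: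
--             return None
--         try:
--             return grid[y][x]
--         except IndexError:
--             return None
--
--     dirs = [(-1, 0), (0, 1), (1, 0), (0, -1)]
--     if is_bfs1:
--         def summits(p, h):
--             if val(p[0], p[1]) != h:
--                 return set()
--             if h == 9:
--                 return {p}
--             s = set()
--             for dy, dx in dirs:
--                 s |= summits((p[0] + dy, p[1] + dx), h + 1)
--             return s
--         return len(summits(start, 0))
--     else:
--         def rating(p, h):
--             if val(p[0], p[1]) != h:
--                 return 0
--             if h == 9:
--                 return 1
--             return sum(rating((p[0] + dy, p[1] + dx), h + 1) for dy, dx in dirs)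
--         return rating(start, 0)
-- ===== Notes on version B (the rewrite author's own statement) =====
-- stated objective: alternative
-- what changed: Replaces A's 9 iterative frontier-expansion passes (a growing set/list rebuilt each round) by a direct depth-first recursion over trail height that returns the summit set (part 1) or the path count (part 2) per cell.
import Mathlib
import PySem

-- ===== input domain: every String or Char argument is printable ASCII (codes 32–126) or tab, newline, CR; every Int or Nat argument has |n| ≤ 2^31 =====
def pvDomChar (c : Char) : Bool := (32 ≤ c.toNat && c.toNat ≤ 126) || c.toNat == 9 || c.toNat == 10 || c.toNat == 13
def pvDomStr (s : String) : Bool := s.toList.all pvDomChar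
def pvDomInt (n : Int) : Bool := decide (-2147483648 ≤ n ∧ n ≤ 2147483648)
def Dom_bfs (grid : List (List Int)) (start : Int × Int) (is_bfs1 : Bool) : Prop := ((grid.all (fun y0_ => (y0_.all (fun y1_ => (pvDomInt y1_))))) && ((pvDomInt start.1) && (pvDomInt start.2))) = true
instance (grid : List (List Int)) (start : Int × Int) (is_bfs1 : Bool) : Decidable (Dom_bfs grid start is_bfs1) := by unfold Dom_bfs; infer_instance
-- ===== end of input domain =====

-- B replaces A's 9 frontier-expansion iterations by a direct recursion over trail height
-- (a distinct-summit set, resp. a path count, computed recursively per cell); same return value, alternative structure.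

-- ===== PORT A =====
-- get_value: None for negative or out-of-range indices (IndexError caught) — total.
def getValue (grid : List (List Int)) (y x : Int) : Option Int :=
  if y < 0 || x < 0 then none
  else match PySem.List.pyGet? grid y with
    | none => none
    | some row => PySem.List.pyGet? row x

-- the literal direction list [(-1,0),(0,1),(1,0),(0,-1)]
def dirsA : List (Int × Int) := [(-1, 0), (0, 1), (1, 0), (0, -1)]

-- one iteration of A's `for i in range(9)` body (nxt starts empty; set-add or list-append per flag)
def bfsStep (grid : List (List Int)) (is_bfs1 : Bool) (cur : List (Int × Int)) (i : Int) : List (Int × Int) :=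
  cur.foldl (fun nxt p =>
    if getValue grid p.1 p.2 ≠ some i then nxt
    else dirsA.foldl (fun nxt d =>
      let np := (p.1 + d.1, p.2 + d.2)
      if is_bfs1 then PySem.Set.add nxt np else nxt ++ [np]) nxt) []

def bfs (grid : List (List Int)) (start : Int × Int) (is_bfs1 : Bool) : Int :=
  let cur0 : List (Int × Int) := if is_bfs1 then PySem.Set.ofList [start] else [start]
  let cur := (PySem.List.pyRange 0 9 1).foldl (bfsStep grid is_bfs1) cur0
  cur.foldl (fun acc p => acc + (if getValue grid p.1 p.2 = some 9 then 1 else 0)) 0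

-- ===== PORT B =====
-- summits(p, h): set of 9-height cells reachable from p climbing by 1; recursion measured by 9 - h
def summitsB (grid : List (List Int)) : Nat → (Int × Int) → List (Int × Int)
  | 0, p => if getValue grid p.1 p.2 ≠ some 9 then [] else [p]
  | r + 1, p =>
    if getValue grid p.1 p.2 ≠ some (9 - ((r : Int) + 1)) then []
    else dirsA.foldl (fun s d => PySem.Set.union s (summitsB grid r (p.1 + d.1, p.2 + d.2))) []

-- rating(p, h): number of height-increasing trails from p to a 9
def ratingB (grid : List (List Int)) : Nat → (Int × Int) → Int
  | 0, p => if getValue grid p.1 p.2 ≠ some 9 then 0 else 1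
  | r + 1, p =>
    if getValue grid p.1 p.2 ≠ some (9 - ((r : Int) + 1)) then 0
    else (dirsA.map (fun d => ratingB grid r (p.1 + d.1, p.2 + d.2))).sum

def bfs_alt (grid : List (List Int)) (start : Int × Int) (is_bfs1 : Bool) : Int :=
  if is_bfs1 then ((summitsB grid 9 start).length : Int) else ratingB grid 9 start

-- ===== PRECONDITION & SPEC =====
def Spec_bfs (grid : List (List Int)) (start : Int × Int) (is_bfs1 : Bool) (out : Int) : Prop := out = bfs_alt grid start is_bfs1
instance (grid : List (List Int)) (start : Int × Int) (is_bfs1 : Bool) (out : Int) : Decidable (Spec_bfs grid start is_bfs1 out) := by unfold Spec_bfs; infer_instance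

-- ===== CLAIM (what is proved, stated in full; the proofs are below) =====
def Claim_equal_bfs : Prop := ∀ (grid : List (List Int)) (start : Int × Int) (is_bfs1 : Bool), Dom_bfs grid start is_bfs1 → Spec_bfs grid start is_bfs1 (bfs grid start is_bfs1)

-- ===== LEMMAS AND PROOFS =====

-- neighbours of a cell, in A's direction order
def nbrsOf (p : Int × Int) : List (Int × Int) := dirsA.map (fun d => (p.1 + d.1, p.2 + d.2))

-- reachability predicate: q is a 9-cell reachable from p climbing 1-by-1, with 9 - height = r
def ReachR (grid : List (List Int)) : Nat → (Int × Int) → (Int × Int) → Prop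
  | 0, p, q => getValue grid p.1 p.2 = some 9 ∧ q = p
  | r + 1, p, q => getValue grid p.1 p.2 = some (9 - ((r : Int) + 1)) ∧
      ∃ d ∈ dirsA, ReachR grid r (p.1 + d.1, p.2 + d.2) q

-- ---- part 2 (lists / path counts) ----

lemma step_false_eq (grid : List (List Int)) (i : Int) (cur : List (Int × Int)) :
    bfsStep grid false cur i
      = cur.flatMap (fun p => if getValue grid p.1 p.2 = some i then nbrsOf p else []) := by
  unfold bfsStep
  rw [PySem.List.foldl_congr_mem
        (g := fun nxt p => nxt ++ (if getValue grid p.1 p.2 = some i then nbrsOf p else []))]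
  · rw [PySem.List.foldl_append_eq_flatMap]; simp
  · intro acc p _
    by_cases h : getValue grid p.1 p.2 = some i <;>
      simp [h, dirsA, nbrsOf, List.append_assoc]

lemma rating_step (grid : List (List Int)) (r : Nat) (i : Int) (h : i = 8 - (r : Int))
    (cur : List (Int × Int)) :
    ((bfsStep grid false cur i).map (ratingB grid r)).sum
      = (cur.map (ratingB grid (r + 1))).sum := by
  rw [step_false_eq]
  induction cur with
  | nil => simp
  | cons p cur ih =>
    simp only [List.flatMap_cons, List.map_append, List.sum_append, List.map_cons, List.sum_cons, ih]
    congr 1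
    by_cases hv : getValue grid p.1 p.2 = some i
    · have h9 : (9 : Int) - ((r : Int) + 1) = i := by omega
      simp [ratingB, h9, hv, nbrsOf, List.map_map]; rfl
    · have h9 : (9 : Int) - ((r : Int) + 1) = i := by omega
      simp [ratingB, h9, hv]

lemma rating_chain (grid : List (List Int)) :
    ∀ (k : Nat), k ≤ 9 → ∀ (cur : List (Int × Int)),
    (((PySem.List.pyRange (9 - (k : Int)) 9 1).foldl (bfsStep grid false) cur).map
        (ratingB grid 0)).sum
      = (cur.map (ratingB grid k)).sum := by
  intro k
  induction k with
  | zero => intro _ cur; norm_num [PySem.List.pyRange_zero]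
  | succ k ih =>
    intro hk cur
    have hlt : (9 : Int) - ((k : Nat) + 1 : Nat) < 9 := by push_cast; omega
    rw [PySem.List.pyRange_one_cons hlt, List.foldl_cons]
    have hcast : (9 : Int) - ((k : Nat) + 1 : Nat) + 1 = 9 - (k : Int) := by push_cast; omega
    rw [hcast, ih (by omega)]
    exact rating_step grid k _ (by push_cast; omega) cur

-- ---- part 1 (sets / distinct summits) ----

lemma mem_step_true (grid : List (List Int)) (i : Int) (cur : List (Int × Int)) (q : Int × Int) :
    q ∈ bfsStep grid true cur i
      ↔ ∃ p ∈ cur, getValue grid p.1 p.2 = some i ∧ ∃ d ∈ dirsA, q = (p.1 + d.1, p.2 + d.2) := by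
  have hstep : bfsStep grid true cur i = cur.foldl (fun nxt p =>
      if getValue grid p.1 p.2 ≠ some i then nxt
      else dirsA.foldl (fun nxt d => PySem.Set.add nxt (p.1 + d.1, p.2 + d.2)) nxt) [] := by
    unfold bfsStep; simp
  have aux : ∀ (cur : List (Int × Int)) (acc : List (Int × Int)),
      q ∈ cur.foldl (fun nxt p =>
          if getValue grid p.1 p.2 ≠ some i then nxt
          else dirsA.foldl (fun nxt d => PySem.Set.add nxt (p.1 + d.1, p.2 + d.2)) nxt) acc
        ↔ q ∈ acc ∨ ∃ p ∈ cur, getValue grid p.1 p.2 = some i ∧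
            ∃ d ∈ dirsA, q = (p.1 + d.1, p.2 + d.2) := by
    intro cur
    induction cur with
    | nil => simp
    | cons p cur ih =>
      intro acc
      rw [List.foldl_cons, ih]
      by_cases hv : getValue grid p.1 p.2 = some i
      · rw [if_neg (by simp [hv]),
          PySem.Set.mem_foldl_add dirsA (fun d => (p.1 + d.1, p.2 + d.2)) acc q]
        simp only [List.mem_cons]
        constructor
        · rintro ((h | h) | h)
          · exact Or.inl h
          · exact Or.inr ⟨p, Or.inl rfl, hv, h⟩
          · obtain ⟨p', hp', hrest⟩ := h; exact Or.inr ⟨p', Or.inr hp', hrest⟩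
        · rintro (h | ⟨p', hp' | hp', hrest⟩)
          · exact Or.inl (Or.inl h)
          · subst hp'; exact Or.inl (Or.inr hrest.2)
          · exact Or.inr ⟨p', hp', hrest⟩
      · rw [if_pos (by simp [hv])]
        simp only [List.mem_cons]
        constructor
        · rintro (h | h)
          · exact Or.inl h
          · obtain ⟨p', hp', hrest⟩ := h; exact Or.inr ⟨p', Or.inr hp', hrest⟩
        · rintro (h | ⟨p', hp' | hp', hrest⟩)
          · exact Or.inl h
          · subst hp'; exact absurd hrest.1 hv
          · exact Or.inr ⟨p', hp', hrest⟩
  rw [hstep]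
  simpa using aux cur []

lemma nodup_step_true (grid : List (List Int)) (i : Int) (cur : List (Int × Int)) :
    (bfsStep grid true cur i).Nodup := by
  have aux : ∀ (cur : List (Int × Int)) (acc : List (Int × Int)), acc.Nodup →
      (cur.foldl (fun nxt p =>
        if getValue grid p.1 p.2 ≠ some i then nxt
        else dirsA.foldl (fun nxt d => PySem.Set.add nxt (p.1 + d.1, p.2 + d.2)) nxt) acc).Nodup := by
    intro cur
    induction cur with
    | nil => intro acc h; simpa using h
    | cons p cur ih =>
      intro acc hacc
      rw [List.foldl_cons]
      apply ih
      by_cases hv : getValue grid p.1 p.2 = some i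
      · rw [if_neg (by simp [hv])]
        have inner : ∀ (l : List (Int × Int)) (s : List (Int × Int)), s.Nodup →
            (l.foldl (fun nxt d => PySem.Set.add nxt (p.1 + d.1, p.2 + d.2)) s).Nodup := by
          intro l
          induction l with
          | nil => intro s h; simpa using h
          | cons d l ihl => intro s h; exact ihl _ (PySem.Set.nodup_add _ _ h)
        exact inner dirsA acc hacc
      · rw [if_pos (by simp [hv])]; exact hacc
  have hstep : bfsStep grid true cur i = cur.foldl (fun nxt p =>
      if getValue grid p.1 p.2 ≠ some i then nxt
      else dirsA.foldl (fun nxt d => PySem.Set.add nxt (p.1 + d.1, p.2 + d.2)) nxt) [] := by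
    unfold bfsStep; simp
  rw [hstep]; exact aux cur [] List.nodup_nil

lemma nodup_foldl_steps (grid : List (List Int)) (l : List Int) (cur : List (Int × Int))
    (h : cur.Nodup) : (l.foldl (bfsStep grid true) cur).Nodup := by
  induction l generalizing cur with
  | nil => simpa using h
  | cons i l ih => exact ih _ (nodup_step_true grid i cur)

lemma mem_summits (grid : List (List Int)) :
    ∀ (r : Nat) (p q : Int × Int), q ∈ summitsB grid r p ↔ ReachR grid r p q := by
  intro r
  induction r with
  | zero =>
    intro p q
    by_cases hv : getValue grid p.1 p.2 = some 9 <;>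
      simp [summitsB, ReachR, hv, eq_comm]
  | succ r ih =>
    intro p q
    have aux : ∀ (l : List (Int × Int)) (s : List (Int × Int)),
        q ∈ l.foldl (fun s d => PySem.Set.union s (summitsB grid r (p.1 + d.1, p.2 + d.2))) s
          ↔ q ∈ s ∨ ∃ d ∈ l, q ∈ summitsB grid r (p.1 + d.1, p.2 + d.2) := by
      intro l
      induction l with
      | nil => simp
      | cons d l ihl =>
        intro s
        rw [List.foldl_cons, ihl, PySem.Set.mem_union]
        simp only [List.mem_cons]
        constructor
        · rintro ((h | h) | ⟨d', hd', h⟩)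
          · exact Or.inl h
          · exact Or.inr ⟨d, Or.inl rfl, h⟩
          · exact Or.inr ⟨d', Or.inr hd', h⟩
        · rintro (h | ⟨d', hd' | hd', h⟩)
          · exact Or.inl (Or.inl h)
          · subst hd'; exact Or.inl (Or.inr h)
          · exact Or.inr ⟨d', hd', h⟩
    by_cases hv : getValue grid p.1 p.2 = some (9 - ((r : Int) + 1))
    · simp only [summitsB]
      rw [if_neg (by simp [hv]), aux]
      simp only [ReachR, hv, true_and, List.not_mem_nil, false_or]
      constructor
      · rintro ⟨d, hd, h⟩; exact ⟨d, hd, (ih _ q).mp h⟩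
      · rintro ⟨d, hd, h⟩; exact ⟨d, hd, (ih _ q).mpr h⟩
    · simp [summitsB, ReachR, hv]

lemma nodup_summits (grid : List (List Int)) (r : Nat) (p : Int × Int) :
    (summitsB grid r p).Nodup := by
  induction r generalizing p with
  | zero =>
    by_cases hv : getValue grid p.1 p.2 = some 9 <;> simp [summitsB, hv]
  | succ r ih =>
    by_cases hv : getValue grid p.1 p.2 = some (9 - ((r : Int) + 1))
    · simp only [summitsB]
      rw [if_neg (by simp [hv])]
      have aux : ∀ (l : List (Int × Int)) (s : List (Int × Int)), s.Nodup →
          (l.foldl (fun s d => PySem.Set.union s (summitsB grid r (p.1 + d.1, p.2 + d.2))) s).Nodup := by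
        intro l
        induction l with
        | nil => intro s h; simpa using h
        | cons d l ihl => intro s h; exact ihl _ (PySem.Set.nodup_union _ _ h)
      exact aux dirsA [] List.nodup_nil
    · simp [summitsB, hv]

lemma reach_chain (grid : List (List Int)) :
    ∀ (k : Nat), k ≤ 9 → ∀ (cur : List (Int × Int)) (q : Int × Int),
    (q ∈ (PySem.List.pyRange (9 - (k : Int)) 9 1).foldl (bfsStep grid true) cur ∧
        getValue grid q.1 q.2 = some 9)
      ↔ ∃ p ∈ cur, ReachR grid k p q := by
  intro k
  induction k with
  | zero =>
    intro _ cur q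
    norm_num [PySem.List.pyRange_zero, ReachR]
  | succ k ih =>
    intro hk cur q
    have hlt : (9 : Int) - ((k : Nat) + 1 : Nat) < 9 := by push_cast; omega
    rw [PySem.List.pyRange_one_cons hlt, List.foldl_cons]
    have hcast : (9 : Int) - ((k : Nat) + 1 : Nat) + 1 = 9 - (k : Int) := by push_cast; omega
    rw [hcast, ih (by omega)]
    have hcast2 : (9 : Int) - ((k : Nat) + 1 : Nat) = 9 - ((k : Int) + 1) := by push_cast; ring
    constructor
    · rintro ⟨p', hp', hr⟩
      rw [mem_step_true] at hp'
      obtain ⟨p, hp, hv, d, hd, rfl⟩ := hp'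
      exact ⟨p, hp, by rw [← hcast2]; exact hv, d, hd, hr⟩
    · rintro ⟨p, hp, hv, d, hd, hr⟩
      refine ⟨(p.1 + d.1, p.2 + d.2), ?_, hr⟩
      rw [mem_step_true]
      exact ⟨p, hp, by rw [hcast2]; exact hv, d, hd, rfl⟩

-- ===== VERDICT (by name: the statement is the Claim_ definition above) =====
theorem bfs_spec : Claim_equal_bfs := by
  intro grid start is_bfs1 _
  unfold Spec_bfs
  cases is_bfs1 with
  | false =>
    show bfs grid start false = bfs_alt grid start false
    unfold bfs bfs_alt
    simp only [Bool.false_eq_true, if_false]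
    rw [PySem.List.foldl_add]
    have hmap : ∀ p : Int × Int,
        (if getValue grid p.1 p.2 = some 9 then (1 : Int) else 0) = ratingB grid 0 p := by
      intro p
      by_cases hv : getValue grid p.1 p.2 = some 9 <;> simp [ratingB, hv]
    rw [List.map_congr_left (fun p _ => hmap p)]
    have h9 : (9 : Int) - ((9 : Nat) : Int) = 0 := by norm_num
    have := rating_chain grid 9 (le_refl 9) [start]
    rw [h9] at this
    rw [this]
    simp
  | true =>
    show bfs grid start true = bfs_alt grid start true
    unfold bfs bfs_alt
    simp only [if_true]
    have hofl : PySem.Set.ofList [start] = [start] :=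
      PySem.Set.ofList_eq_self_of_nodup [start] (List.nodup_singleton _)
    rw [hofl, PySem.List.foldl_add]
    set cur9 := (PySem.List.pyRange 0 9 1).foldl (bfsStep grid true) [start] with hcur9
    have hcount : ∀ (l : List (Int × Int)),
        (l.map (fun p => if getValue grid p.1 p.2 = some 9 then (1 : Int) else 0)).sum
          = (l.countP (fun q => decide (getValue grid q.1 q.2 = some 9)) : Int) := by
      intro l
      induction l with
      | nil => simp
      | cons p l ihl =>
        simp only [List.map_cons, List.sum_cons, List.countP_cons, ihl]
        by_cases hv : getValue grid p.1 p.2 = some 9 <;> simp [hv] <;> omega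
    rw [hcount]
    have hnodup9 : cur9.Nodup :=
      nodup_foldl_steps grid _ _ (List.nodup_singleton _)
    have hmem : ∀ q, (q ∈ cur9 ∧ getValue grid q.1 q.2 = some 9) ↔ q ∈ summitsB grid 9 start := by
      intro q
      have h9 : (9 : Int) - ((9 : Nat) : Int) = 0 := by norm_num
      have hc := reach_chain grid 9 (le_refl 9) [start] q
      rw [h9] at hc
      rw [hcur9, hc, mem_summits]
      simp
    have hfilter : cur9.countP (fun q => decide (getValue grid q.1 q.2 = some 9))
        = (summitsB grid 9 start).length := by
      rw [List.countP_eq_length_filter]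
      have hperm : List.Perm (cur9.filter (fun q => decide (getValue grid q.1 q.2 = some 9)))
          (summitsB grid 9 start) := by
        rw [List.perm_ext_iff_of_nodup (hnodup9.filter _) (nodup_summits grid 9 start)]
        intro q
        rw [List.mem_filter, ← hmem q]
        simp
      exact hperm.length_eq
    rw [hfilter]
    simp
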